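-- pv_equiv track=rewrite | github.com/atten-tutu/finger-vein-recognition | toolCode/gzj_tool.py | get_issame
-- ===== SOURCE A (Python) =====
-- from itertools import combinations
--
-- def get_issame(total_class_num, single_class_num):
--     """
--     两个参数: 总的测试集的类别数目, 单个类中图片的个数
--     返回值: 匹配的方式(下标索引), 每个匹配对是否为同一类的issame数组
--     """
--     total_pic_num = total_class_num * single_class_num
--     a = [i for i in range(total_pic_num)]
--     num_elements_per_combination = 2
--     val_pair = list(combinations(a, num_elements_per_combination))
--     issame = []
--     for i in range(1, total_class_num + 1):
--         for j in range(1, single_class_num + 1):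
--             issame.extend([1] * (single_class_num - j))
--             issame.extend([0] * (total_class_num - i) * single_class_num)
--     return val_pair, issame
-- ===== SOURCE B (Python) =====
-- from itertools import combinations
--
--
-- def get_issame(total_class_num, single_class_num):
--     total_pic_num = total_class_num * single_class_num
--     val_pair = list(combinations(range(total_pic_num), 2))
--     issame = [1 if x // single_class_num == y // single_class_num else 0
--               for (x, y) in val_pair]
--     return val_pair, issame
-- ===== Notes on version B (the rewrite author's own statement) =====
-- stated objective: simpler
-- what changed: Replaces A's blind nested run-length loop (emitting blocks of 1s and 0s indexed by class/position counters) with a direct per-pair same-class test (x // single_class_num == y // single_class_num) mapped over the generated pairs.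
-- outside the precondition, e.g. on get_issame(-1, -2): A returns ([(0, 1)], []), B returns ([(0, 1)], [0])
import Mathlib
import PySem

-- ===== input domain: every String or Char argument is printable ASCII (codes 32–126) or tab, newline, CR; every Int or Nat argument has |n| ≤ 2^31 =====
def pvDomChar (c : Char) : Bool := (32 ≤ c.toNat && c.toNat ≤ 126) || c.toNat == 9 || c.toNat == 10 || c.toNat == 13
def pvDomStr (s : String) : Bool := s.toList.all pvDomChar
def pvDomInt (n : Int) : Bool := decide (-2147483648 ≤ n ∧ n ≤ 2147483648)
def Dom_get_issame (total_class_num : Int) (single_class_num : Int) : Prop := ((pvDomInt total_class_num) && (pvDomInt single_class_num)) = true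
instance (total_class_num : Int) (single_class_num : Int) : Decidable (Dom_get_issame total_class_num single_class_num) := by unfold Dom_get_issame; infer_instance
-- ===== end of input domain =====

-- B replaces A's blind run-length counting loop for issame with a direct per-pair
-- same-class test (floor-division by single_class_num) mapped over the pair list; same cost, simpler.


-- ===== PORT A =====
-- itertools.combinations(l, 2), ported by hand (exact: pairs (l[i], l[j]) with i < j, in order)
def pvComb2 : List Int → List (Int × Int)
  | [] => []
  | x :: xs => xs.map (fun y => (x, y)) ++ pvComb2 xs

def get_issame (total_class_num : Int) (single_class_num : Int) : (List (Int × Int)) × List Int :=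
  let total_pic_num := total_class_num * single_class_num
  let a := PySem.List.pyRange 0 total_pic_num 1
  let val_pair := pvComb2 a
  let issame := (PySem.List.pyRange 1 (total_class_num + 1) 1).foldl (fun acc i =>
    (PySem.List.pyRange 1 (single_class_num + 1) 1).foldl (fun acc j =>
      (acc ++ List.replicate (single_class_num - j).toNat 1)
        ++ List.replicate ((total_class_num - i).toNat * single_class_num.toNat) 0) acc) []
  (val_pair, issame)

-- ===== PORT B =====
def get_issame_alt (total_class_num : Int) (single_class_num : Int) : (List (Int × Int)) × List Int :=
  let total_pic_num := total_class_num * single_class_num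
  let val_pair := pvComb2 (PySem.List.pyRange 0 total_pic_num 1)
  let issame := val_pair.map (fun p =>
    if PySem.Int.floordiv p.1 single_class_num = PySem.Int.floordiv p.2 single_class_num
    then (1 : Int) else 0)
  (val_pair, issame)

-- ===== PRECONDITION & SPEC =====
-- Pre_ excludes only the both-negative inputs (their product is a positive pic count): there A
-- returns a nonempty val_pair with an EMPTY issame — an artefact of its 1..total/1..single loops —
-- while B labels every pair; on every other input A's issame is well-formed and B matches it.
def Pre_get_issame (total_class_num : Int) (single_class_num : Int) : Prop :=
  0 ≤ total_class_num ∨ 0 ≤ single_class_num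
instance (total_class_num : Int) (single_class_num : Int) : Decidable (Pre_get_issame total_class_num single_class_num) := by unfold Pre_get_issame; infer_instance
def pvWitness_get_issame : Int × Int := (2, 3)

def Spec_get_issame (total_class_num : Int) (single_class_num : Int) (out : (List (Int × Int)) × List Int) : Prop := out = get_issame_alt total_class_num single_class_num
instance (total_class_num : Int) (single_class_num : Int) (out : (List (Int × Int)) × List Int) : Decidable (Spec_get_issame total_class_num single_class_num out) := by unfold Spec_get_issame; infer_instance

-- ===== CLAIM (what is proved, stated in full; the proofs are below) =====
def Claim_equal_get_issame : Prop := ∀ (total_class_num : Int) (single_class_num : Int), Dom_get_issame total_class_num single_class_num → Pre_get_issame total_class_num single_class_num → Spec_get_issame total_class_num single_class_num (get_issame total_class_num single_class_num)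

-- ===== LEMMAS AND PROOFS =====

-- Nat-level model of B's per-pair flag and of B's issame list over a list of indices
def flagN (s x y : Nat) : Int := if x / s = y / s then 1 else 0

def flagsN (s : Nat) : List Nat → List Int
  | [] => []
  | x :: xs => xs.map (flagN s x) ++ flagsN s xs

-- B's mapped comb2 over a cast index list is flagsN
lemma map_comb2_cast (s : Nat) (l : List Nat) :
    (pvComb2 (l.map (fun k : Nat => (k : Int)))).map (fun p =>
      if PySem.Int.floordiv p.1 (s : Int) = PySem.Int.floordiv p.2 (s : Int)
      then (1 : Int) else 0) = flagsN s l := by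
  induction l with
  | nil => rfl
  | cons x xs ih =>
    rw [List.map_cons]
    have h : pvComb2 ((x : Int) :: xs.map (fun k : Nat => (k : Int)))
        = (xs.map (fun k : Nat => (k : Int))).map (fun y => ((x : Int), y))
          ++ pvComb2 (xs.map (fun k : Nat => (k : Int))) := rfl
    rw [h, List.map_append, ih, flagsN]
    simp only [List.map_map]
    congr 1
    apply List.map_congr_left
    intro y _
    simp only [Function.comp_apply, flagN, PySem.Int.floordiv_natCast, Nat.cast_inj]

lemma flagsN_range' (s N : Nat) : ∀ (k a : Nat), a + k = N → flagsN s (List.range' a k) =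
    (List.range' a k).flatMap (fun x => (List.range' (x + 1) (N - (x + 1))).map (flagN s x)) := by
  intro k
  induction k with
  | zero => intro a _; rfl
  | succ k ih =>
    intro a hN
    rw [List.range'_succ]
    show (List.range' (a + 1) k).map (flagN s a) ++ flagsN s (List.range' (a + 1) k) = _
    rw [List.flatMap_cons, ih (a + 1) (by omega)]
    have e : N - (a + 1) = k := by omega
    rw [e]

-- per-element block: B's flags for the tail range after x split into 1s then 0s
lemma block_eq (s x N : Nat) (hs : 0 < s) (hle : (x / s + 1) * s ≤ N) :
    (List.range' (x + 1) (N - (x + 1))).map (flagN s x) =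
      List.replicate ((x / s + 1) * s - (x + 1)) 1 ++ List.replicate (N - (x / s + 1) * s) 0 := by
  have hmul : (x / s + 1) * s = x / s * s + s := by ring
  have hmod : x / s * s + x % s = x := Nat.div_add_mod' x s
  have hmlt : x % s < s := Nat.mod_lt _ hs
  have hxm : x < (x / s + 1) * s := by omega
  have hsplit : List.range' (x + 1) ((x / s + 1) * s - (x + 1)) ++
      List.range' ((x / s + 1) * s) (N - (x / s + 1) * s) = List.range' (x + 1) (N - (x + 1)) := by
    have h1 : (x + 1) + 1 * ((x / s + 1) * s - (x + 1)) = (x / s + 1) * s := by omega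
    have h2 : ((x / s + 1) * s - (x + 1)) + (N - (x / s + 1) * s) = N - (x + 1) := by omega
    rw [← h2, ← List.range'_append, h1]
  rw [← hsplit, List.map_append]
  congr 1
  · rw [List.eq_replicate_iff]
    refine ⟨by simp, ?_⟩
    intro b hb
    obtain ⟨y, hy, rfl⟩ := List.mem_map.mp hb
    rw [List.mem_range'_1] at hy
    have hcs : x / s * s ≤ x := Nat.div_mul_le_self x s
    have hdiv : y / s = x / s := by
      refine Nat.div_eq_of_lt_le (by omega) (by omega)
    simp [flagN, hdiv]
  · rw [List.eq_replicate_iff]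
    refine ⟨by simp, ?_⟩
    intro b hb
    obtain ⟨y, hy, rfl⟩ := List.mem_map.mp hb
    rw [List.mem_range'_1] at hy
    have hdiv : x / s + 1 ≤ y / s := (Nat.le_div_iff_mul_le hs).mpr (by omega)
    simp only [flagN, ite_eq_right_iff]
    intro h
    omega

lemma range_mul_flatMap (t s : Nat) :
    List.range (t * s) = (List.range t).flatMap (fun i => List.range' (i * s) s) := by
  induction t with
  | zero => simp
  | succ t ih =>
    rw [List.range_succ, List.flatMap_append, ← ih, Nat.succ_mul, List.range_add]
    simp [List.range'_eq_map_range]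

-- the common canonical block form of issame for nonnegative class counts
def canon (tn sn : Nat) : List Int :=
  (List.range tn).flatMap (fun i => (List.range sn).flatMap (fun j =>
    List.replicate (sn - 1 - j) 1 ++ List.replicate ((tn - 1 - i) * sn) 0))

lemma B_canon (tn sn : Nat) : flagsN sn (List.range (tn * sn)) = canon tn sn := by
  rcases Nat.eq_zero_or_pos sn with h | h
  · subst h
    simp only [Nat.mul_zero, List.range_zero, canon]
    show ([] : List Int) = _
    simp
  · rw [List.range_eq_range', flagsN_range' sn (tn * sn) (tn * sn) 0 (by omega)]
    rw [List.flatMap_congr (g := fun x =>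
      List.replicate ((x / sn + 1) * sn - (x + 1)) 1 ++ List.replicate (tn * sn - (x / sn + 1) * sn) 0)
      (by
        intro x hx
        rw [List.mem_range'_1] at hx
        have hxN : x < tn * sn := by omega
        have hxN' : x < sn * tn := by rw [Nat.mul_comm]; exact hxN
        have hdivlt : x / sn < tn := Nat.div_lt_of_lt_mul hxN'
        have hle : (x / sn + 1) * sn ≤ tn * sn := Nat.mul_le_mul_right sn (by omega)
        rw [block_eq sn x (tn * sn) h hle])]
    rw [← List.range_eq_range', range_mul_flatMap, List.flatMap_assoc]
    unfold canon
    apply List.flatMap_congr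
    intro i hi
    rw [List.mem_range] at hi
    rw [List.range'_eq_map_range, List.flatMap_map]
    apply List.flatMap_congr
    intro j hj
    rw [List.mem_range] at hj
    have hdiv : (i * sn + j) / sn = i := by
      rw [Nat.add_comm, Nat.add_mul_div_right _ _ h, Nat.div_eq_of_lt hj, Nat.zero_add]
    rw [hdiv]
    have e1 : (i + 1) * sn = i * sn + sn := by ring
    have e2 : (tn - 1 - i) * sn = tn * sn - (i + 1) * sn := by
      have : tn - 1 - i = tn - (i + 1) := by omega
      rw [this, Nat.sub_mul]
    congr 2 <;> omega

lemma A_canon (tn sn : Nat) :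
    (PySem.List.pyRange 1 ((tn : Int) + 1) 1).foldl (fun acc i =>
      (PySem.List.pyRange 1 ((sn : Int) + 1) 1).foldl (fun acc j =>
        (acc ++ List.replicate ((sn : Int) - j).toNat 1)
          ++ List.replicate (((tn : Int) - i).toNat * (sn : Int).toNat) 0) acc) []
    = canon tn sn := by
  simp only [List.append_assoc, PySem.List.foldl_append_eq_flatMap]
  rw [List.nil_append]
  have h1 : PySem.List.pyRange 1 ((tn : Int) + 1) 1
      = (List.range tn).map (fun k : Nat => (1 : Int) + k) := by
    have e : ((tn : Int) + 1 - 1).toNat = tn := by omega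
    rw [PySem.List.pyRange_one, e]
  have h2 : PySem.List.pyRange 1 ((sn : Int) + 1) 1
      = (List.range sn).map (fun k : Nat => (1 : Int) + k) := by
    have e : ((sn : Int) + 1 - 1).toNat = sn := by omega
    rw [PySem.List.pyRange_one, e]
  rw [h1, h2]
  simp only [List.flatMap_map]
  unfold canon
  apply List.flatMap_congr
  intro i _
  apply List.flatMap_congr
  intro j _
  have e1 : ((sn : Int) - (1 + (j : Int))).toNat = sn - 1 - j := by omega
  have e2 : (((tn : Int) - (1 + (i : Int))).toNat) = tn - 1 - i := by omega
  have e3 : ((sn : Int)).toNat = sn := by omega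
  rw [e1, e2, e3]

theorem get_issame_spec : Claim_equal_get_issame := by
  intro t s _ hpre
  show (get_issame t s) = get_issame_alt t s
  unfold get_issame get_issame_alt
  refine congrArg (Prod.mk _) ?_
  rcases lt_or_ge t 0 with ht | ht
  · -- t < 0, so 0 ≤ s by Pre_; everything is empty
    have hs : 0 ≤ s := hpre.resolve_left (by omega)
    have hn : t * s ≤ 0 := mul_nonpos_of_nonpos_of_nonneg (by omega) hs
    rw [PySem.List.pyRange_one_eq_nil (by omega : t + 1 ≤ 1),
      PySem.List.pyRange_one_eq_nil (by omega : t * s ≤ 0)]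
    rfl
  · rcases lt_or_ge s 0 with hs | hs
    · -- 0 ≤ t, s < 0: B's range is empty; A's inner loop range is empty
      have hn : t * s ≤ 0 := mul_nonpos_of_nonneg_of_nonpos ht (by omega)
      rw [PySem.List.pyRange_one_eq_nil (by omega : s + 1 ≤ 1),
        PySem.List.pyRange_one_eq_nil (by omega : t * s ≤ 0)]
      simp [List.foldl_fixed, pvComb2]
    · -- main case: 0 ≤ t, 0 ≤ s
      lift t to ℕ using ht with tn
      lift s to ℕ using hs with sn
      have hrange : PySem.List.pyRange 0 ((tn : Int) * (sn : Int)) 1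
          = (List.range (tn * sn)).map (fun k : Nat => (k : Int)) := by
        rw [PySem.List.pyRange_one]
        have : (((tn : Int) * (sn : Int)) - 0).toNat = tn * sn := by
          rw [Int.sub_zero, ← Nat.cast_mul, Int.toNat_natCast]
        rw [this]
        simp
      rw [hrange, map_comb2_cast, B_canon, A_canon]
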